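-- pv_equiv track=rewrite | github.com/Ryles1/AdventofCode | 2015/day8_2015.py | count_code_characters
-- ===== SOURCE A (Python) =====
-- def count_code_characters(s):
--     length = 0
--     i = 0
--     s = s.strip().strip('"')
--     while i < len(s):
--         window = s[i: i + 2]
--         if window == r'\"':
--             length += 1
--             i += 2
--         elif window == r'\x':
--             length += 1
--             i += 4
--         elif window == r'\\':
--             length += 1
--             i += 2
--         else:
--             length += 1
--             i += 1
--     return length
-- ===== SOURCE B (Python) =====
-- def count_code_characters(s):
--     # Single-pass character state machine (no lookahead, no cursor jumps):
--     # state 0 = normal, 1 = just after a backslash, 2/3 = skipping the two chars after \x.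
--     s = s.strip().strip('"')
--     total = 0
--     state = 0
--     for c in s:
--         if state == 0:
--             total += 1
--             if c == '\\':
--                 state = 1
--         elif state == 1:
--             if c == '"' or c == '\\':
--                 state = 0
--             elif c == 'x':
--                 state = 2
--             else:
--                 total += 1
--                 state = 0
--         elif state == 2:
--             state = 3
--         else:
--             state = 0
--     return total
-- ===== Notes on version B (the rewrite author's own statement) =====
-- stated objective: faster
-- what changed: Replaces A's lookahead cursor (a fresh two-char window slice per step with jumps of 1, 2 or 4) by a single forward pass over the characters driven by a 4-state state machine (normal / after-backslash / two skip states), with no slicing and no lookahead.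
import Mathlib
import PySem

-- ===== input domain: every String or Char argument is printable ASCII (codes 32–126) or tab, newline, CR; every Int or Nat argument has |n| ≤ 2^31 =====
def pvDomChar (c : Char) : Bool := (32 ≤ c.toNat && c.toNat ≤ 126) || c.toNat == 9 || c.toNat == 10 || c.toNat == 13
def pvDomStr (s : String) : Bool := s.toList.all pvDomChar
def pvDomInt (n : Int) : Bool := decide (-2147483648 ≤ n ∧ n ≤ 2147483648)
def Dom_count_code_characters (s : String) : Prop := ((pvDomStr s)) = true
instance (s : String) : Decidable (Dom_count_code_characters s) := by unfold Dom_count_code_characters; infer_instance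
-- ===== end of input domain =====

-- B replaces A's lookahead cursor (slices + jumps of 1/2/4) by a single-pass 4-state
-- character state machine with no lookahead or slicing; measured faster by a constant factor.

-- ===== PORT A =====
-- while i < len(s): window = s[i:i+2]; branch; length += 1; i += 1/2/4
def pvALoop (cs : List Char) (length : Int) (i : Nat) : Int :=
  if h : i < cs.length then
    let window := PySem.List.slice cs (some (i : Int)) (some ((i : Int) + 2))
    if window = ['\\', '"'] then pvALoop cs (length + 1) (i + 2)
    else if window = ['\\', 'x'] then pvALoop cs (length + 1) (i + 4)
    else if window = ['\\', '\\'] then pvALoop cs (length + 1) (i + 2)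
    else pvALoop cs (length + 1) (i + 1)
  else length
termination_by cs.length - i
decreasing_by all_goals omega

def count_code_characters (s : String) : Int :=
  pvALoop (PySem.Str.stripChars (PySem.Str.strip s) "\"").toList 0 0

-- ===== PORT B =====
-- state 0 = normal, 1 = just after a backslash, 2/3 = skipping the two chars after \x
def pvBStep (acc : Int × Int) (c : Char) : Int × Int :=
  if acc.2 = 0 then (acc.1 + 1, if c = '\\' then 1 else 0)
  else if acc.2 = 1 then
    if c = '"' ∨ c = '\\' then (acc.1, 0)
    else if c = 'x' then (acc.1, 2)
    else (acc.1 + 1, 0)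
  else if acc.2 = 2 then (acc.1, 3)
  else (acc.1, 0)

def count_code_characters_alt (s : String) : Int :=
  ((PySem.Str.stripChars (PySem.Str.strip s) "\"").toList.foldl pvBStep (0, 0)).1

-- ===== PRECONDITION & SPEC =====
def Spec_count_code_characters (s : String) (out : Int) : Prop := out = count_code_characters_alt s
instance (s : String) (out : Int) : Decidable (Spec_count_code_characters s out) := by
  unfold Spec_count_code_characters; infer_instance

-- ===== CLAIM =====
def Claim_equal_count_code_characters : Prop :=
  ∀ (s : String), Dom_count_code_characters s → Spec_count_code_characters s (count_code_characters s)

-- ===== LEMMAS AND PROOFS =====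

-- canonical structural recursion both ports are reduced to
def pvF : List Char → Int
  | [] => 0
  | '\\' :: '"' :: r => 1 + pvF r
  | '\\' :: 'x' :: r => 1 + pvF (r.drop 2)
  | '\\' :: '\\' :: r => 1 + pvF r
  | _ :: r => 1 + pvF r
termination_by l => l.length
decreasing_by all_goals (simp [List.length_drop]; try omega)

lemma pvF_nil : pvF [] = 0 := by simp [pvF]

lemma pvF_bq (r : List Char) : pvF ('\\' :: '"' :: r) = 1 + pvF r := by simp [pvF]

lemma pvF_bx (r : List Char) : pvF ('\\' :: 'x' :: r) = 1 + pvF (r.drop 2) := by simp [pvF]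

lemma pvF_bb (r : List Char) : pvF ('\\' :: '\\' :: r) = 1 + pvF r := by simp [pvF]

lemma pvF_single (c : Char) : pvF [c] = 1 := by
  rw [pvF.eq_def]; split <;> simp_all [pvF]

lemma pvF_cons_ne (c : Char) (r : List Char) (hc : c ≠ '\\') : pvF (c :: r) = 1 + pvF r := by
  rw [pvF.eq_def]; split <;> simp_all

lemma pvF_bc (c : Char) (r : List Char) (h1 : c ≠ '"') (h2 : c ≠ 'x') (h3 : c ≠ '\\') :
    pvF ('\\' :: c :: r) = 1 + pvF (c :: r) := by
  rw [pvF.eq_def]; split <;> simp_all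

lemma pvALoop_eq_pvF (cs : List Char) : ∀ n i length, cs.length - i ≤ n →
    pvALoop cs length i = length + pvF (cs.drop i) := by
  intro n
  induction n with
  | zero =>
    intro i length h
    have hge : cs.length ≤ i := by omega
    rw [pvALoop]
    simp only [dif_neg (by omega : ¬ i < cs.length)]
    rw [List.drop_of_length_le hge, pvF_nil]
    ring
  | succ n ih =>
    intro i length h
    by_cases hi : i < cs.length
    · have hw : PySem.List.slice cs (some (i : Int)) (some ((i : Int) + 2))
          = (cs.drop i).take 2 := by
        have := PySem.List.slice_natCast_add cs i 2
        simpa using this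
      have hd2 : cs.drop (i + 2) = (cs.drop i).drop 2 := by
        rw [List.drop_drop]
      have hd4 : cs.drop (i + 4) = (cs.drop i).drop 4 := by
        rw [List.drop_drop]
      have hd1 : cs.drop (i + 1) = (cs.drop i).drop 1 := by
        rw [List.drop_drop]
      have hne : cs.drop i ≠ [] := by
        simp [List.drop_eq_nil_iff]; omega
      rw [pvALoop]
      simp only [dif_pos hi, hw]
      match hcs : cs.drop i with
      | [] => exact absurd hcs hne
      | [c] =>
        rw [if_neg (by simp), if_neg (by simp), if_neg (by simp)]
        rw [ih (i + 1) (length + 1) (by omega), hd1, hcs]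
        simp only [List.drop_succ_cons, List.drop_nil, pvF_nil, pvF_single]
        ring
      | c1 :: c2 :: r =>
        have htake : (c1 :: c2 :: r).take 2 = [c1, c2] := rfl
        rw [htake]
        by_cases h1 : c1 = '\\' ∧ c2 = '"'
        · obtain ⟨e1, e2⟩ := h1; subst e1; subst e2
          rw [if_pos rfl, ih (i + 2) (length + 1) (by omega), hd2, hcs, pvF_bq]
          simp only [List.drop_succ_cons, List.drop_zero]
          ring
        · rw [if_neg (by simpa using fun a b => h1 ⟨a, b⟩)]
          by_cases h2 : c1 = '\\' ∧ c2 = 'x'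
          · obtain ⟨e1, e2⟩ := h2; subst e1; subst e2
            rw [if_pos rfl, ih (i + 4) (length + 1) (by omega), hd4, hcs, pvF_bx]
            simp only [List.drop_succ_cons]
            ring_nf
          · rw [if_neg (by simpa using fun a b => h2 ⟨a, b⟩)]
            by_cases h3 : c1 = '\\' ∧ c2 = '\\'
            · obtain ⟨e1, e2⟩ := h3; subst e1; subst e2
              rw [if_pos rfl, ih (i + 2) (length + 1) (by omega), hd2, hcs, pvF_bb]
              simp only [List.drop_succ_cons, List.drop_zero]
              ring
            · rw [if_neg (by simpa using fun a b => h3 ⟨a, b⟩)]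
              rw [ih (i + 1) (length + 1) (by omega), hd1, hcs]
              have hv : pvF (c1 :: c2 :: r) = 1 + pvF (c2 :: r) := by
                by_cases hb : c1 = '\\'
                · subst hb
                  exact pvF_bc c2 r (fun a => h1 ⟨rfl, a⟩) (fun a => h2 ⟨rfl, a⟩)
                    (fun a => h3 ⟨rfl, a⟩)
                · exact pvF_cons_ne c1 (c2 :: r) hb
              simp only [List.drop_succ_cons, List.drop_zero, hv]
              ring
    · rw [pvALoop]
      simp only [dif_neg hi]
      rw [List.drop_of_length_le (by omega), pvF_nil]
      ring

lemma pvFold_all : ∀ (n : Nat) (l : List Char), l.length ≤ n →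
    (∀ t : Int, (l.foldl pvBStep (t, 0)).1 = t + pvF l) ∧
    (∀ t : Int, (l.foldl pvBStep (t, 1)).1 = t + pvF ('\\' :: l) - 1) ∧
    (∀ t : Int, (l.foldl pvBStep (t, 2)).1 = t + pvF (l.drop 2)) ∧
    (∀ t : Int, (l.foldl pvBStep (t, 3)).1 = t + pvF (l.drop 1)) := by
  intro n
  induction n with
  | zero =>
    intro l h
    have hl : l = [] := List.eq_nil_of_length_eq_zero (by omega)
    subst hl
    simp [pvF_nil, pvF_single]
  | succ n ih =>
    intro l h
    cases l with
    | nil => simp [pvF_nil, pvF_single]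
    | cons c r =>
      obtain ⟨H0, H1, H2, H3⟩ := ih r (by simp at h; omega)
      refine ⟨?_, ?_, ?_, ?_⟩
      · intro t
        by_cases hc : c = '\\'
        · subst hc
          have hstep : pvBStep (t, 0) '\\' = (t + 1, 1) := by simp [pvBStep]
          rw [List.foldl_cons, hstep, H1]
          ring
        · have hstep : pvBStep (t, 0) c = (t + 1, 0) := by simp [pvBStep, hc]
          rw [List.foldl_cons, hstep, H0, pvF_cons_ne c r hc]
          ring
      · intro t
        by_cases hq : c = '"'
        · subst hq
          have hstep : pvBStep (t, 1) '"' = (t, 0) := by simp [pvBStep]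
          rw [List.foldl_cons, hstep, H0, pvF_bq]
          ring
        · by_cases hb : c = '\\'
          · subst hb
            have hstep : pvBStep (t, 1) '\\' = (t, 0) := by simp [pvBStep]
            rw [List.foldl_cons, hstep, H0, pvF_bb]
            ring
          · by_cases hx : c = 'x'
            · subst hx
              have hstep : pvBStep (t, 1) 'x' = (t, 2) := by simp [pvBStep]
              rw [List.foldl_cons, hstep, H2, pvF_bx]
              ring
            · have hstep : pvBStep (t, 1) c = (t + 1, 0) := by
                simp [pvBStep, hq, hb, hx]
              rw [List.foldl_cons, hstep, H0, pvF_bc c r hq hx hb, pvF_cons_ne c r hb]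
              ring
      · intro t
        have hstep : pvBStep (t, 2) c = (t, 3) := by simp [pvBStep]
        rw [List.foldl_cons, hstep, H3]
        simp
      · intro t
        have hstep : pvBStep (t, 3) c = (t, 0) := by simp [pvBStep]
        rw [List.foldl_cons, hstep, H0]
        simp

lemma pvFold_zero (l : List Char) : (l.foldl pvBStep (0, 0)).1 = pvF l := by
  have := (pvFold_all l.length l le_rfl).1 0
  simpa using this

-- ===== VERDICT =====
theorem count_code_characters_spec : Claim_equal_count_code_characters := by
  intro s _
  unfold Spec_count_code_characters count_code_characters count_code_characters_alt
  rw [pvALoop_eq_pvF _ ((PySem.Str.stripChars (PySem.Str.strip s) "\"").toList.length) 0 0 (by omega)]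
  rw [pvFold_zero]
  simp
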